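-- pv_equiv track=rewrite | github.com/ukataria/IronsiteHackathon | scripts/finetune_gdino.py | build_captions_and_token_span
-- ===== SOURCE A (Python) =====
-- def build_captions_and_token_span(
--     cat_list: list[str], force_lowercase: bool = True
-- ) -> tuple[str, dict[str, list[tuple[int, int]]]]:
--     """Build a '. '-joined caption and character-level span per category."""
--     cat2span: dict[str, list[tuple[int, int]]] = {}
--     caption = ""
--     for cat in cat_list:
--         phrase = cat.lower() if force_lowercase else cat
--         start = len(caption)
--         caption += phrase
--         end = len(caption)
--         cat2span[cat] = [(start, end)]
--         caption += " . "
--     caption = caption.rstrip(" .")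
--     return caption, cat2span
-- ===== SOURCE B (Python) =====
-- def build_captions_and_token_span(
--     cat_list: list[str], force_lowercase: bool = True
-- ) -> tuple[str, dict[str, list[tuple[int, int]]]]:
--     """Join the phrases once, then compute spans from a running offset."""
--     phrases = [c.lower() if force_lowercase else c for c in cat_list]
--     caption = " . ".join(phrases).rstrip(" .")
--     cat2span: dict[str, list[tuple[int, int]]] = {}
--     offset = 0
--     for cat, phrase in zip(cat_list, phrases):
--         cat2span[cat] = [(offset, offset + len(phrase))]
--         offset += len(phrase) + 3
--     return caption, cat2span
-- ===== Notes on version B (the rewrite author's own statement) =====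
-- stated objective: simpler
-- what changed: B replaces A's single loop that grows the caption string while recording spans by a ' . '.join of a pre-built phrase list (then the same rstrip) plus a separate span pass over a running integer offset.
import Mathlib
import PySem

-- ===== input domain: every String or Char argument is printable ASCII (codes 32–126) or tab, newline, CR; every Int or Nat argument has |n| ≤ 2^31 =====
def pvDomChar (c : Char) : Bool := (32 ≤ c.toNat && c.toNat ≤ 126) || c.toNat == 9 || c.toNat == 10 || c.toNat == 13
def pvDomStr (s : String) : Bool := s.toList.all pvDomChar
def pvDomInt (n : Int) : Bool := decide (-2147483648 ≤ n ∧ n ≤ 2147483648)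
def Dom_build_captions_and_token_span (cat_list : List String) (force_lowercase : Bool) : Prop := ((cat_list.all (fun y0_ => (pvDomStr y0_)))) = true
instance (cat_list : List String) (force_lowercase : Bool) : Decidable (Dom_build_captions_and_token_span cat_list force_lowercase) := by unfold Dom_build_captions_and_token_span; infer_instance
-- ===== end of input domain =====

-- B builds the caption with one ' . '.join plus rstrip and computes the spans in a
-- separate pass from a running offset (objective: simpler; return values only, no mutation).

-- s.rstrip(" .") ported by hand (PySem has rstrip only for whitespace): drop the
-- trailing chars in {' ', '.'}; exact for Python's str.rstrip(" .").
def pvRstripDots (cs : List Char) : List Char :=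
  (cs.reverse.dropWhile (fun c => c == ' ' || c == '.')).reverse

-- ===== PORT A =====
def build_captions_and_token_span (cat_list : List String) (force_lowercase : Bool) : String × (List (String × List (Int × Int))) :=
  let st := cat_list.foldl
    (fun (st : List Char × PySem.Dict String (List (Int × Int))) cat =>
      let phrase := if force_lowercase then PySem.Chars.lower cat.toList else cat.toList
      let start : Int := st.1.length
      let cap := st.1 ++ phrase
      let e : Int := cap.length
      let d := st.2.insert cat [(start, e)]
      (cap ++ [' ', '.', ' '], d))
    ([], PySem.Dict.empty)
  (String.ofList (pvRstripDots st.1), st.2.items)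

-- ===== PORT B =====
-- the span loop of Source B: dict built from a running offset over (cat, phrase) pairs
def pvSpanLoop : List (String × List Char) → Int → PySem.Dict String (List (Int × Int)) → PySem.Dict String (List (Int × Int))
  | [], _, d => d
  | (cat, ph) :: rest, off, d =>
      pvSpanLoop rest (off + ph.length + 3) (d.insert cat [(off, off + (ph.length : Int))])

def build_captions_and_token_span_alt (cat_list : List String) (force_lowercase : Bool) : String × (List (String × List (Int × Int))) :=
  let phrases := cat_list.map (fun c => if force_lowercase then PySem.Chars.lower c.toList else c.toList)
  let caption := String.ofList (pvRstripDots (PySem.Chars.join [' ', '.', ' '] phrases))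
  let cat2span := pvSpanLoop (cat_list.zip phrases) 0 PySem.Dict.empty
  (caption, cat2span.items)

-- ===== PRECONDITION & SPEC =====
def Spec_build_captions_and_token_span (cat_list : List String) (force_lowercase : Bool) (out : String × (List (String × List (Int × Int)))) : Prop := out = build_captions_and_token_span_alt cat_list force_lowercase
instance (cat_list : List String) (force_lowercase : Bool) (out : String × (List (String × List (Int × Int)))) : Decidable (Spec_build_captions_and_token_span cat_list force_lowercase out) := by unfold Spec_build_captions_and_token_span; infer_instance

-- ===== CLAIM (what is proved, stated in full; the proofs are below) =====
def Claim_equal_build_captions_and_token_span : Prop := ∀ (cat_list : List String) (force_lowercase : Bool), Dom_build_captions_and_token_span cat_list force_lowercase → Spec_build_captions_and_token_span cat_list force_lowercase (build_captions_and_token_span cat_list force_lowercase)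

-- ===== LEMMAS AND PROOFS =====

-- A's loop, with its state generalised: the caption is the flattened phrase++sep
-- blocks and the dict is exactly B's span loop started at the current length.
theorem pvLoopA_eq (f : Bool) (cats : List String) (cap0 : List Char)
    (d0 : PySem.Dict String (List (Int × Int))) :
    cats.foldl
      (fun (st : List Char × PySem.Dict String (List (Int × Int))) cat =>
        let phrase := if f then PySem.Chars.lower cat.toList else cat.toList
        let start : Int := st.1.length
        let cap := st.1 ++ phrase
        let e : Int := cap.length
        let d := st.2.insert cat [(start, e)]
        (cap ++ [' ', '.', ' '], d))
      (cap0, d0)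
    = (cap0 ++ ((cats.map (fun c => if f then PySem.Chars.lower c.toList else c.toList)).map (fun p => p ++ [' ', '.', ' '])).flatten,
       pvSpanLoop (cats.zip (cats.map (fun c => if f then PySem.Chars.lower c.toList else c.toList))) (cap0.length : Int) d0) := by
  induction cats generalizing cap0 d0 with
  | nil => simp [pvSpanLoop]
  | cons c rest ih =>
      simp only [List.foldl, List.map, List.flatten, List.zip, List.zipWith, pvSpanLoop]
      rw [ih]
      have hl3 : ∀ (x y : List Char), (((x ++ y ++ [' ', '.', ' ']).length : Int)) = (x.length : Int) + (y.length : Int) + 3 := by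
        intro x y; simp; ring
      have hl2 : ∀ (x y : List Char), (((x ++ y).length : Int)) = (x.length : Int) + (y.length : Int) := by
        intro x y; simp
      rw [hl3, hl2]
      simp only [Prod.mk.injEq]
      exact ⟨by simp, rfl⟩

-- the trailing-separator blocks are the join followed by one separator (nonempty case)
theorem pvFlatten_eq_join (ps : List (List Char)) :
    ((ps.map (fun p => p ++ [' ', '.', ' '])).flatten)
      = if ps = [] then [] else PySem.Chars.join [' ', '.', ' '] ps ++ [' ', '.', ' '] := by
  induction ps with
  | nil => simp
  | cons a t ih =>
      cases t with
      | nil => simp [PySem.Chars.join_singleton]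
      | cons b t' =>
          rw [List.map_cons, List.flatten_cons, ih, if_neg (by simp : (b :: t' : List (List Char)) ≠ []),
            PySem.Chars.join_cons_cons]
          simp [List.append_assoc]

-- rstrip(" .") ignores one more trailing separator
theorem pvRstrip_append_sep (x : List Char) :
    pvRstripDots (x ++ [' ', '.', ' ']) = pvRstripDots x := by
  simp [pvRstripDots, List.dropWhile]

theorem pvCaption_eq (ps : List (List Char)) :
    pvRstripDots ((ps.map (fun p => p ++ [' ', '.', ' '])).flatten)
      = pvRstripDots (PySem.Chars.join [' ', '.', ' '] ps) := by
  rw [pvFlatten_eq_join]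
  by_cases h : ps = []
  · simp [h, PySem.Chars.join_nil]
  · rw [if_neg h, pvRstrip_append_sep]

-- ===== VERDICT (by name: the statement is the Claim_ definition above) =====
theorem build_captions_and_token_span_spec : Claim_equal_build_captions_and_token_span := by
  intro cat_list force_lowercase _
  unfold Spec_build_captions_and_token_span
  unfold build_captions_and_token_span build_captions_and_token_span_alt
  rw [pvLoopA_eq]
  simp only [List.nil_append, List.length_nil, Nat.cast_zero]
  rw [pvCaption_eq]
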